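-- pv_equiv track=rewrite | github.com/2642002surya/KoKo-W | KoKoroMichi - v3.1.1/utils/combact.py | award_xp
-- ===== SOURCE A (Python) =====
-- def award_xp(waifu, xp):
--     leveled_up = False
--     waifu['exp'] = waifu.get('exp', 0) + xp
--     while waifu['exp'] >= waifu.get('level', 1) * 100 and waifu.get(
--             'level', 1) < 100:
--         waifu['exp'] -= waifu['level'] * 100
--         waifu['level'] = waifu.get('level', 1) + 1
--         waifu['atk'] = waifu.get('atk', 50) + 5
--         waifu['hp'] = waifu.get('hp', 500) + 25
--         waifu['crit'] = waifu.get('crit', 5) + 1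
--         leveled_up = True
--     return leveled_up, waifu['level']
-- ===== SOURCE B (Python) =====
-- def award_xp(waifu, xp):
--     # Closed-form level-up count via binary search instead of simulating the loop.
--     E = waifu.get('exp', 0) + xp
--     L = waifu.get('level', 1)
--     if L < 100 and E >= L * 100:
--         # largest n in [1, 100-L] with total cost 50*n*n + (100*L-50)*n <= E
--         lo, hi = 1, 100 - L
--         while lo < hi:
--             mid = (lo + hi + 1) // 2
--             if 50 * mid * mid + (100 * L - 50) * mid <= E:
--                 lo = mid
--             else:
--                 hi = mid - 1
--         n = lo
--         waifu['exp'] = E - (50 * n * n + (100 * L - 50) * n)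
--         waifu['level'] = L + n
--         waifu['atk'] = waifu.get('atk', 50) + 5 * n
--         waifu['hp'] = waifu.get('hp', 500) + 25 * n
--         waifu['crit'] = waifu.get('crit', 5) + n
--         return True, waifu['level']
--     waifu['exp'] = E
--     return False, waifu['level']
-- ===== Notes on version B (the rewrite author's own statement) =====
-- stated objective: alternative
-- what changed: A simulates level-ups one at a time in a while loop that repeatedly re-reads and rewrites the dict; B computes the exact level-up count n by binary search on the closed-form total cost 50n^2+(100L-50)n and applies the exp/level/atk/hp/crit changes once.
import Mathlib
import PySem

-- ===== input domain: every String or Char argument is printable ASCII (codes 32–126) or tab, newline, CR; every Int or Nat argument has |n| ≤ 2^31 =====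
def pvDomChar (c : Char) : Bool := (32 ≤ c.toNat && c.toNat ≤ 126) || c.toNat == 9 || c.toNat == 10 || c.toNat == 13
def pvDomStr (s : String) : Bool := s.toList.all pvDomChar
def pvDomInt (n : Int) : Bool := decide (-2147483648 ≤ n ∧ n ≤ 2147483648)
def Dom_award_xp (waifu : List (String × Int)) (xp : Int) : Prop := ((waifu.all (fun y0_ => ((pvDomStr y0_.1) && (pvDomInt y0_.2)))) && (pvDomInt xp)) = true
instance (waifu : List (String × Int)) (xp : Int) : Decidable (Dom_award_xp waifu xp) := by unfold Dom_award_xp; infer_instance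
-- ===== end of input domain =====

-- B replaces A's one-level-at-a-time simulation by a binary search for the exact level-up
-- count n, applying all stat changes at once (alternative decomposition, O(log) iterations).
-- Both Pythons mutate the dict argument identically; the equivalence proved here is about
-- the RETURN value only.

-- ===== PORT A =====
-- A's while loop over the dict state; 'none' models a KeyError on waifu['level'].
-- The Nat argument is fuel making the loop total: each iteration increases 'level' by 1 and
-- the guard needs level < 100, so (100 - level).toNat + 1 is proven sufficient below.
def awardLoop (fuel : Nat) (d : PySem.Dict String Int) (flag : Bool) : Option (Bool × Int) :=
  match fuel with
  | 0 => none
  | fuel + 1 =>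
    match d.get? "exp" with
    | none => none
    | some e =>
      if d.getD "level" 1 * 100 ≤ e ∧ d.getD "level" 1 < 100 then
        match d.get? "level" with
        | none => none           -- KeyError: waifu['level']
        | some lv =>
          let d1 := d.insert "exp" (e - lv * 100)
          let d2 := d1.insert "level" (d1.getD "level" 1 + 1)
          let d3 := d2.insert "atk" (d2.getD "atk" 50 + 5)
          let d4 := d3.insert "hp" (d3.getD "hp" 500 + 25)
          let d5 := d4.insert "crit" (d4.getD "crit" 5 + 1)
          awardLoop fuel d5 true
      else
        (d.get? "level").map (fun lv => (flag, lv))   -- return leveled_up, waifu['level']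

def award_xp (waifu : List (String × Int)) (xp : Int) : Bool × Int :=
  let d := PySem.Dict.ofList waifu
  let d1 := d.insert "exp" (d.getD "exp" 0 + xp)   -- waifu['exp'] = waifu.get('exp', 0) + xp
  (awardLoop ((100 - d1.getD "level" 1).toNat + 1) d1 false).getD (false, 0)
  -- the getD default is never reached under Pre_

-- ===== PORT B =====
-- Source B's binary search: largest n in [lo, hi] with 50n² + (100L-50)n ≤ E.
-- Fuel: hi - lo shrinks by at least 1 per step, so (hi - lo).toNat + 1 is proven sufficient.
def bsearchLoop (fuel : Nat) (L E lo hi : Int) : Int :=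
  match fuel with
  | 0 => lo
  | fuel + 1 =>
    if lo < hi then
      let mid := PySem.Int.floordiv (lo + hi + 1) 2
      if 50 * mid * mid + (100 * L - 50) * mid ≤ E then bsearchLoop fuel L E mid hi
      else bsearchLoop fuel L E lo (mid - 1)
    else lo

def award_xp_alt (waifu : List (String × Int)) (xp : Int) : Bool × Int :=
  let d := PySem.Dict.ofList waifu
  let E := d.getD "exp" 0 + xp
  let L := d.getD "level" 1
  if L < 100 ∧ L * 100 ≤ E then
    let n := bsearchLoop ((100 - L - 1).toNat + 1) L E 1 (100 - L)
    (true, L + n)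
  else
    -- return False, waifu['level']; KeyError (→ default) only outside Pre_
    ((d.get? "level").map (fun lv => (false, lv))).getD (false, 0)

-- ===== PRECONDITION & SPEC =====
-- Pre_ excludes exactly the inputs whose dict has no 'level' key: there the Python A always
-- raises KeyError (in the loop body or at the final waifu['level']) and returns nothing.
def Pre_award_xp (waifu : List (String × Int)) (xp : Int) : Prop :=
  (PySem.Dict.ofList waifu).contains "level" = true
instance (waifu : List (String × Int)) (xp : Int) : Decidable (Pre_award_xp waifu xp) := by
  unfold Pre_award_xp; infer_instance
def pvWitness_award_xp : (List (String × Int)) × Int := ([("level", 1), ("exp", 50)], 75)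

def Spec_award_xp (waifu : List (String × Int)) (xp : Int) (out : Bool × Int) : Prop := out = award_xp_alt waifu xp
instance (waifu : List (String × Int)) (xp : Int) (out : Bool × Int) : Decidable (Spec_award_xp waifu xp out) := by unfold Spec_award_xp; infer_instance

-- ===== CLAIM (what is proved, stated in full; the proofs are below) =====
def Claim_equal_award_xp : Prop := ∀ (waifu : List (String × Int)) (xp : Int), Dom_award_xp waifu xp → Pre_award_xp waifu xp → Spec_award_xp waifu xp (award_xp waifu xp)

-- ===== LEMMAS AND PROOFS =====

-- pure-state version of A's loop (level, exp, leveled_up flag)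
def simLoop (L E : Int) (flag : Bool) : Bool × Int :=
  if L * 100 ≤ E ∧ L < 100 then simLoop (L + 1) (E - L * 100) true else (flag, L)
termination_by (100 - L).toNat
decreasing_by omega

-- number of iterations of A's loop
def simCount (L E : Int) : Int :=
  if L * 100 ≤ E ∧ L < 100 then 1 + simCount (L + 1) (E - L * 100) else 0
termination_by (100 - L).toNat
decreasing_by omega

-- total xp cost of n level-ups starting at level L
def cost (L n : Int) : Int := 50 * n * n + (100 * L - 50) * n

theorem simLoop_eq (L E : Int) (flag : Bool) :
    simLoop L E flag = (flag || decide (L * 100 ≤ E ∧ L < 100), L + simCount L E) := by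
  fun_induction simLoop with
  | case1 L E flag h ih =>
    rw [simCount, if_pos h, ih]
    simp [h]
    omega
  | case2 L E flag h =>
    rw [simCount, if_neg h]
    simp [h]

-- A's dict loop, projected to its (level, exp) state; any sufficient fuel gives the same run
theorem awardLoop_eq (k : Nat) : ∀ (d : PySem.Dict String Int) (L E : Int) (flag : Bool),
    (100 - L).toNat ≤ k →
    d.get? "level" = some L → d.get? "exp" = some E →
    awardLoop (k + 1) d flag = some (simLoop L E flag) := by
  induction k with
  | zero =>
    intro d L E flag hk hL hE
    rw [awardLoop, simLoop]
    have hgd : d.getD "level" 1 = L := by rw [PySem.Dict.getD_eq_get?_getD, hL]; rfl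
    have : ¬ (L * 100 ≤ E ∧ L < 100) := by omega
    simp [hE, hL, hgd, this]
  | succ k ih =>
    intro d L E flag hk hL hE
    rw [awardLoop, simLoop]
    have hgd : d.getD "level" 1 = L := by rw [PySem.Dict.getD_eq_get?_getD, hL]; rfl
    by_cases hc : L * 100 ≤ E ∧ L < 100
    · simp only [hE, hgd, hL, if_pos hc]
      apply ih
      · omega
      · simp only [PySem.Dict.get?_insert, PySem.Dict.getD_insert, String.reduceEq, reduceIte, hgd]
      · simp only [PySem.Dict.get?_insert, String.reduceEq, reduceIte]
    · simp [hE, hgd, hL, hc]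

theorem simCount_spec (L E : Int) (hg : L * 100 ≤ E) (hl : L < 100) :
    1 ≤ simCount L E ∧ simCount L E ≤ 100 - L ∧ cost L (simCount L E) ≤ E ∧
      (simCount L E = 100 - L ∨ E < cost L (simCount L E + 1)) := by
  fun_induction simCount with
  | case1 L E h ih =>
    by_cases h2 : (L + 1) * 100 ≤ E - L * 100 ∧ L + 1 < 100
    · obtain ⟨i1, i2, i3, i4⟩ := ih h2.1 h2.2
      refine ⟨by omega, by omega, ?_, ?_⟩
      · simp only [cost] at *; nlinarith [i3]
      · rcases i4 with h4 | h4
        · left; omega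
        · right; simp only [cost] at *; nlinarith [h4]
    · rw [simCount, if_neg h2]
      refine ⟨by norm_num, by omega, by simp [cost]; omega, ?_⟩
      simp only [cost]
      by_cases h3 : L + 1 < 100
      · right
        have : ¬ ((L + 1) * 100 ≤ E - L * 100) := fun hc => h2 ⟨hc, h3⟩
        nlinarith [this]
      · left; omega
  | case2 L E h => exact absurd ⟨hg, hl⟩ h

-- the binary search returns a value satisfying the run-length characterisation
theorem bsearch_spec (L E : Int) : ∀ (k : Nat) (lo hi : Int), (hi - lo).toNat ≤ k →
    lo ≤ hi → cost L lo ≤ E →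
    lo ≤ bsearchLoop (k + 1) L E lo hi ∧ bsearchLoop (k + 1) L E lo hi ≤ hi ∧
      cost L (bsearchLoop (k + 1) L E lo hi) ≤ E ∧
      (bsearchLoop (k + 1) L E lo hi = hi ∨ E < cost L (bsearchLoop (k + 1) L E lo hi + 1)) := by
  intro k
  induction k with
  | zero =>
    intro lo hi hk h1 h2
    have : lo = hi := by omega
    subst this
    rw [bsearchLoop, if_neg (by omega)]
    exact ⟨le_refl _, le_refl _, h2, Or.inl rfl⟩
  | succ k ih =>
    intro lo hi hk h1 h2
    by_cases hlt : lo < hi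
    · rw [bsearchLoop, if_pos hlt]
      have hfd := PySem.Int.floordiv_eq_ediv_of_pos (a := lo + hi + 1) (b := 2) (by omega)
      set mid := PySem.Int.floordiv (lo + hi + 1) 2 with hmid
      have hb1 : lo < mid := by omega
      have hb2 : mid ≤ hi := by omega
      by_cases hc : 50 * mid * mid + (100 * L - 50) * mid ≤ E
      · rw [if_pos hc]
        obtain ⟨i1, i2, i3, i4⟩ := ih mid hi (by omega) hb2 (by simpa [cost] using hc)
        exact ⟨by omega, i2, i3, i4⟩
      · rw [if_neg hc]
        obtain ⟨i1, i2, i3, i4⟩ := ih lo (mid - 1) (by omega) (by omega) h2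
        refine ⟨i1, by omega, i3, ?_⟩
        rcases i4 with h | h
        · right; rw [h, show mid - 1 + 1 = mid from by ring]; simp only [cost] at *; omega
        · right; exact h
    · rw [bsearchLoop, if_neg hlt]
      exact ⟨le_refl _, h1, h2, Or.inl (by omega)⟩

-- the cost of n level-ups is convex in n: a budget that covers 1 and m covers everything between
theorem cost_convex (L E i m : Int) (h1 : 1 ≤ i) (h2 : i ≤ m)
    (hc1 : cost L 1 ≤ E) (hcm : cost L m ≤ E) : cost L i ≤ E := by
  simp only [cost] at *
  by_cases hm : m = 1
  · have : i = 1 := by omega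
    subst this; subst hm; exact hc1
  · have hm1 : (0:Int) < m - 1 := by omega
    have e1 : (m - 1) * (50 * i * i + (100 * L - 50) * i) =
        (m - i) * (50 * 1 * 1 + (100 * L - 50) * 1) + (i - 1) * (50 * m * m + (100 * L - 50) * m)
          - 50 * ((m - 1) * ((i - 1) * (m - i))) := by ring
    have e2 : (m - i) * (50 * 1 * 1 + (100 * L - 50) * 1) ≤ (m - i) * E :=
      mul_le_mul_of_nonneg_left hc1 (by omega)
    have e3 : (i - 1) * (50 * m * m + (100 * L - 50) * m) ≤ (i - 1) * E :=
      mul_le_mul_of_nonneg_left hcm (by omega)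
    have e4 : (0:Int) ≤ (m - 1) * ((i - 1) * (m - i)) :=
      mul_nonneg (by omega) (mul_nonneg (by omega) (by omega))
    have key : (m - 1) * (50 * i * i + (100 * L - 50) * i) ≤ (m - 1) * E := by nlinarith
    exact le_of_mul_le_mul_left key hm1

-- any two numbers satisfying the run-length characterisation coincide
theorem count_unique (L E x y : Int) (hg : L * 100 ≤ E)
    (hx : 1 ≤ x ∧ x ≤ 100 - L ∧ cost L x ≤ E ∧ (x = 100 - L ∨ E < cost L (x + 1)))
    (hy : 1 ≤ y ∧ y ≤ 100 - L ∧ cost L y ≤ E ∧ (y = 100 - L ∨ E < cost L (y + 1))) :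
    x = y := by
  obtain ⟨x1, x2, x3, x4⟩ := hx
  obtain ⟨y1, y2, y3, y4⟩ := hy
  have hc1 : cost L 1 ≤ E := by simp only [cost]; nlinarith
  by_contra hne
  rcases lt_or_gt_of_ne hne with h | h
  · rcases x4 with h4 | h4
    · omega
    · exact absurd (cost_convex L E (x + 1) y (by omega) (by omega) hc1 y3) (by omega)
  · rcases y4 with h4 | h4
    · omega
    · exact absurd (cost_convex L E (y + 1) x (by omega) (by omega) hc1 x3) (by omega)

-- ===== VERDICT (by name: the statement is the Claim_ definition above) =====
theorem award_xp_spec : Claim_equal_award_xp := by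
  intro waifu xp _ hpre
  unfold Spec_award_xp award_xp award_xp_alt
  dsimp only
  have hsome : ((PySem.Dict.ofList waifu).get? "level").isSome := by
    rw [← PySem.Dict.contains_eq_isSome_get?]; exact hpre
  obtain ⟨L, hL⟩ := Option.isSome_iff_exists.mp hsome
  set d := PySem.Dict.ofList waifu with hd
  set E := d.getD "exp" 0 + xp with hE
  have hgd : d.getD "level" 1 = L := by rw [PySem.Dict.getD_eq_get?_getD, hL]; rfl
  have h1L : (d.insert "exp" E).get? "level" = some L := by
    simp only [PySem.Dict.get?_insert, String.reduceEq, reduceIte]; exact hL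
  have h1E : (d.insert "exp" E).get? "exp" = some E := by
    simp only [PySem.Dict.get?_insert, reduceIte]
  have h1gd : (d.insert "exp" E).getD "level" 1 = L := by
    rw [PySem.Dict.getD_eq_get?_getD, h1L]; rfl
  have hrun := awardLoop_eq ((100 - L).toNat) (d.insert "exp" E) L E false le_rfl h1L h1E
  rw [h1gd, hrun, simLoop_eq]
  simp only [hgd, Option.getD_some, Bool.false_or]
  by_cases hg : L < 100 ∧ L * 100 ≤ E
  · rw [if_pos hg]
    have hs := simCount_spec L E hg.2 hg.1
    have hb := bsearch_spec L E (100 - L - 1).toNat 1 (100 - L) (by omega) (by omega)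
      (by simp only [cost]; nlinarith [hg.2])
    have : simCount L E = bsearchLoop ((100 - L - 1).toNat + 1) L E 1 (100 - L) :=
      count_unique L E _ _ hg.2 hs ⟨hb.1, hb.2.1, hb.2.2.1, hb.2.2.2⟩
    simp [this, hg.2, hg.1]
  · rw [if_neg hg]
    have hc : ¬ (L * 100 ≤ E ∧ L < 100) := fun h => hg ⟨h.2, h.1⟩
    have : simCount L E = 0 := by rw [simCount, if_neg hc]
    simp [this, hc, hL]
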